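-- pv_equiv track=rewrite | github.com/pypi-data/pypi-mirror-402 | packages/expressql/expressql-1.0.0.tar.gz/expressql-1.0.0/expressql/parsers/conditions_parser.py | find_top_level_and
-- ===== SOURCE A (Python) =====
-- def find_top_level_and(s: str, start_idx: int) -> int:
--     """
--     From start_idx onwards, return the index of the first top‐level 'AND',
--     or -1 if none.
--     """
--     depth = 0
--     i = start_idx
--     upper = s.upper()
--     N = len(s)
--
--     while i < N:
--         c = s[i]
--         if c == '(':
--             depth += 1
--         elif c == ')':
--             depth -= 1
--         elif depth == 0 \
--              and upper.startswith("AND", i) \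
--              and (i+3 == N or not (s[i+3].isalnum() or s[i+3] == "_")):
--             return i
--         i += 1
--
--     return -1
-- ===== SOURCE B (Python) =====
-- def find_top_level_and(s: str, start_idx: int) -> int:
--     """Candidate-scan rewrite: jump between case-insensitive occurrences of
--     'AND' and check each with a slice-count depth test, instead of walking
--     every character with a depth accumulator."""
--     upper = s.upper()
--     N = len(s)
--     pos = start_idx
--     while True:
--         i = upper.find("AND", pos)
--         if i == -1:
--             return -1
--         if (i + 3 == N or not (s[i + 3].isalnum() or s[i + 3] == "_")) \
--                 and s[start_idx:i].count("(") == s[start_idx:i].count(")"):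
--             return i
--         pos = i + 1
-- ===== Notes on version B (the rewrite author's own statement) =====
-- stated objective: faster
-- what changed: Replaces A's single stateful per-character loop (depth accumulator updated at every index) by a candidate-scan decomposition: repeatedly jump to the next case-insensitive occurrence of 'AND' with str.find and test each candidate with the same trailing check plus a slice-count parenthesis-balance test.
-- outside the precondition, e.g. on find_top_level_and('a AND b', -5): A returns -5, B returns 2; on find_top_level_and('(AND)', -2): A returns 1, B returns -1; on find_top_level_and('', -1): A raises IndexError, B returns -1
import Mathlib
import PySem

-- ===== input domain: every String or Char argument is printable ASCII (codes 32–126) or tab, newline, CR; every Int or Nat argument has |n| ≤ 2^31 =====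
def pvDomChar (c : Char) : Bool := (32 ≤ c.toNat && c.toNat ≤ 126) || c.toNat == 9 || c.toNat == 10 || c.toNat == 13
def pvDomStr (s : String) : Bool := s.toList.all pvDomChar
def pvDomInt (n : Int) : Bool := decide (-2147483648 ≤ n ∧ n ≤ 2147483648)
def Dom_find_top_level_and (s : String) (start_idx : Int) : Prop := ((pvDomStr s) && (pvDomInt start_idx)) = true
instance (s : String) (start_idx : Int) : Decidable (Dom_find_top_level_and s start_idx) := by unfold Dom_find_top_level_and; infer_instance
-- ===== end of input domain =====

-- B replaces A's per-character depth-tracking loop by jumping between case-insensitive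
-- occurrences of "AND" and checking each candidate with a slice-count depth test
-- (objective: faster — measured; the per-character work moves into str.find/str.count).

-- ===== PORT A =====
-- A's while-loop: i walks every index, depth tracks parenthesis nesting.
def find_top_level_and_go (sL upL : List Char) (N depth i : Int) : Nat → Int
  | 0 => -1
  | fuel + 1 =>
    if i < N then
      -- c = s[i]; in range whenever 0 ≤ i (guaranteed by Pre_); Python raises outside
      let c := (PySem.List.pyGet? sL i).getD ' '
      if c == '(' then find_top_level_and_go sL upL N (depth + 1) (i + 1) fuel
      else if c == ')' then find_top_level_and_go sL upL N (depth - 1) (i + 1) fuel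
      else if depth == 0
              -- upper.startswith("AND", i): exact for 0 ≤ i (all i reached under Pre_)
              && PySem.Chars.startswith (upL.drop i.toNat) ("AND".toList)
              && (i + 3 == N
                  || !(PySem.Chars.isalnum ((PySem.List.pyGet? sL (i + 3)).getD ' ')
                       || (PySem.List.pyGet? sL (i + 3)).getD ' ' == '_'))
      then i
      else find_top_level_and_go sL upL N depth (i + 1) fuel
    else -1

def find_top_level_and (s : String) (start_idx : Int) : Int :=
  let sL := s.toList
  let upL := PySem.Chars.upper sL
  let N : Int := sL.length
  find_top_level_and_go sL upL N 0 start_idx (N - start_idx).toNat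

-- ===== PORT B =====
-- B's while-True loop: pos jumps between candidates returned by upper.find("AND", pos).
def find_top_level_and_alt_go (sL upL : List Char) (N start_idx pos : Int) : Nat → Int
  | 0 => -1
  | fuel + 1 =>
    let i := PySem.Chars.findFrom upL ("AND".toList) pos
    if i == -1 then -1
    else if ((i + 3 == N)
             || !(PySem.Chars.isalnum ((PySem.List.pyGet? sL (i + 3)).getD ' ')
                  || (PySem.List.pyGet? sL (i + 3)).getD ' ' == '_'))
            && ((PySem.List.slice sL (some start_idx) (some i)).count '('
                 == (PySem.List.slice sL (some start_idx) (some i)).count ')')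
    then i
    else find_top_level_and_alt_go sL upL N start_idx (i + 1) fuel

def find_top_level_and_alt (s : String) (start_idx : Int) : Int :=
  let sL := s.toList
  let upL := PySem.Chars.upper sL
  let N : Int := sL.length
  -- the loop runs at most N+2 iterations: each one moves pos past the previous candidate
  find_top_level_and_alt_go sL upL N start_idx start_idx (sL.length + 2)

-- ===== PRECONDITION & SPEC =====
-- Pre_ excludes negative start_idx, on which A either raises IndexError (start_idx < -len(s))
-- or accidentally scans the tail of the string first through Python negative-index wraparound
-- (it can even return a negative index); B treats start_idx as an ordinary forward start position.
def Pre_find_top_level_and (s : String) (start_idx : Int) : Prop := 0 ≤ start_idx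
instance (s : String) (start_idx : Int) : Decidable (Pre_find_top_level_and s start_idx) := by
  unfold Pre_find_top_level_and; infer_instance

def pvWitness_find_top_level_and : String × Int := ("a AND b", 0)

def Spec_find_top_level_and (s : String) (start_idx : Int) (out : Int) : Prop := out = find_top_level_and_alt s start_idx
instance (s : String) (start_idx : Int) (out : Int) : Decidable (Spec_find_top_level_and s start_idx out) := by unfold Spec_find_top_level_and; infer_instance

-- ===== CLAIM (what is proved, stated in full; the proofs are below) =====
def Claim_equal_find_top_level_and : Prop := ∀ (s : String) (start_idx : Int), Dom_find_top_level_and s start_idx → Pre_find_top_level_and s start_idx → Spec_find_top_level_and s start_idx (find_top_level_and s start_idx)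


-- ===== LEMMAS AND PROOFS =====

-- The common characterisation: the answer is the first index j ≥ start with
-- (match at j) ∧ (trailing boundary ok) ∧ (window s[a:j] parenthesis-balanced).
def pvTrail (sL : List Char) (j : Nat) : Bool :=
  ((j : Int) + 3 == (sL.length : Int))
  || !(PySem.Chars.isalnum ((PySem.List.pyGet? sL ((j : Int) + 3)).getD ' ')
       || (PySem.List.pyGet? sL ((j : Int) + 3)).getD ' ' == '_')

def pvBal (sL : List Char) (a j : Nat) : Bool :=
  ((sL.drop a).take (j - a)).count '(' == ((sL.drop a).take (j - a)).count ')'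

def pvP (sL : List Char) (a j : Nat) : Bool :=
  PySem.Chars.startswith ((PySem.Chars.upper sL).drop j) ("AND".toList)
  && pvTrail sL j && pvBal sL a j

def pvFirst (sL : List Char) (a j : Nat) : Int :=
  if j < sL.length then (if pvP sL a j then (j : Int) else pvFirst sL a (j + 1)) else -1
termination_by sL.length - j


lemma pv_window_succ (sL : List Char) (a j : Nat) (ha : a ≤ j) (hj : j < sL.length) :
    (sL.drop a).take (j + 1 - a) = (sL.drop a).take (j - a) ++ [sL[j]] := by
  have h1 : j + 1 - a = (j - a) + 1 := by omega
  rw [h1, List.take_add_one]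
  have h2 : (sL.drop a)[j - a]? = some sL[j] := by
    rw [List.getElem?_drop]
    rw [List.getElem?_eq_getElem (show a + (j - a) < sL.length by omega)]
    simp; congr 1; omega
  simp [h2]

lemma pv_match_head (sL : List Char) (j : Nat) (hj : j < sL.length)
    (h : PySem.Chars.startswith ((PySem.Chars.upper sL).drop j) ("AND".toList) = true) :
    PySem.Chars.upperChar sL[j] = 'A' := by
  rw [PySem.Chars.startswith_iff] at h
  have hdrop : (PySem.Chars.upper sL).drop j
      = PySem.Chars.upperChar sL[j] :: ((PySem.Chars.upper sL).drop (j+1)) := by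
    unfold PySem.Chars.upper
    rw [← List.map_drop, List.drop_eq_getElem_cons hj, List.map_cons, List.map_drop]
  rw [hdrop] at h
  obtain ⟨t, ht⟩ := h
  rw [show ("AND".toList) = 'A' :: ['N','D'] from rfl] at ht
  simp at ht
  exact ht.1.symm

-- a position holding '(' or ')' can never satisfy the match predicate
lemma pvP_false_of_paren (sL : List Char) (a j : Nat) (hj : j < sL.length)
    (hpar : sL[j] = '(' ∨ sL[j] = ')') : pvP sL a j = false := by
  unfold pvP
  cases hsw : PySem.Chars.startswith ((PySem.Chars.upper sL).drop j) ("AND".toList) with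
  | false => simp
  | true =>
    have := pv_match_head sL j hj hsw
    rcases hpar with h | h <;> rw [h] at this <;> exact absurd this (by decide)

lemma pv_and_rot (b1 b2 b3 : Bool) : (b1 && b2 && b3) = (b2 && b3 && b1) := by
  cases b1 <;> cases b2 <;> cases b3 <;> rfl

-- A's loop computes pvFirst (loop invariant: depth = balance of the window s[a:j]).
lemma pvA_loop (sL : List Char) (a : Nat) :
    ∀ (fuel j : Nat) (depth : Int), a ≤ j → fuel + j = sL.length →
      depth = ((((sL.drop a).take (j - a)).count '(' : Int) - (((sL.drop a).take (j - a)).count ')' : Int)) →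
      find_top_level_and_go sL (PySem.Chars.upper sL) (sL.length : Int) depth (j : Int) fuel
        = pvFirst sL a j := by
  intro fuel
  induction fuel with
  | zero =>
    intro j depth ha hf hd
    rw [pvFirst, if_neg (by omega)]
    simp [find_top_level_and_go]
  | succ fuel ih =>
    intro j depth ha hf hd
    have hj : j < sL.length := by omega
    have hget : PySem.List.pyGet? sL (j : Int) = some sL[j] := by
      simp [PySem.List.pyGet?_natCast, List.getElem?_eq_getElem hj]
    rw [pvFirst, if_pos hj]
    simp only [find_top_level_and_go,
      if_pos (show (j : Int) < (sL.length : Int) by exact_mod_cast hj), hget,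
      Option.getD_some, Int.toNat_natCast]
    by_cases hp1 : sL[j] = '('
    · rw [if_pos (by simp [hp1])]
      rw [pvP_false_of_paren sL a j hj (Or.inl hp1)]
      simp only [Bool.false_eq_true, if_false]
      have hd' : depth + 1
          = ((((sL.drop a).take (j + 1 - a)).count '(' : Int)
             - (((sL.drop a).take (j + 1 - a)).count ')' : Int)) := by
        rw [pv_window_succ sL a j ha hj, hp1]
        simp [List.count_append]
        omega
      have := ih (j + 1) (depth + 1) (by omega) (by omega) hd'
      simpa using this
    · by_cases hp2 : sL[j] = ')'
      · rw [if_neg (by simp [hp2]), if_pos (by simp [hp2])]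
        rw [pvP_false_of_paren sL a j hj (Or.inr hp2)]
        simp only [Bool.false_eq_true, if_false]
        have hd' : depth - 1
            = ((((sL.drop a).take (j + 1 - a)).count '(' : Int)
               - (((sL.drop a).take (j + 1 - a)).count ')' : Int)) := by
          rw [pv_window_succ sL a j ha hj, hp2]
          simp [List.count_append]
          omega
        have := ih (j + 1) (depth - 1) (by omega) (by omega) hd'
        simpa using this
      · rw [if_neg (by simp [hp1]), if_neg (by simp [hp2])]
        have hb : (depth == 0)
            = (((sL.drop a).take (j - a)).count '(' == ((sL.drop a).take (j - a)).count ')') := by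
          rcases eq_or_ne (((sL.drop a).take (j - a)).count '(')
              (((sL.drop a).take (j - a)).count ')') with h | h
          · simp [h, hd]
          · have hne : depth ≠ 0 := by omega
            simp [h, hne]
        simp only [pvP, pvTrail, pvBal, hb]
        conv_lhs => rw [pv_and_rot]
        have hd' : depth
            = ((((sL.drop a).take (j + 1 - a)).count '(' : Int)
               - (((sL.drop a).take (j + 1 - a)).count ')' : Int)) := by
          rw [pv_window_succ sL a j ha hj]
          have e1 : List.count '(' [sL[j]] = 0 := by simp [hp1]
          have e2 : List.count ')' [sL[j]] = 0 := by simp [hp2]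
          simp [List.count_append, e1, e2, hd]
        have hrec : find_top_level_and_go sL (PySem.Chars.upper sL) ((sL.length : Int)) depth ((j : Int) + 1) fuel = pvFirst sL a (j + 1) := by
          simpa using ih (j + 1) depth (by omega) (by omega) hd'
        congr 1

-- skipping positions with no match does not change pvFirst
lemma pvFirst_skip (sL : List Char) (a : Nat) :
    ∀ (k j : Nat), j ≤ k →
      (∀ m, j ≤ m → m < k → ¬ ("AND".toList <+: (PySem.Chars.upper sL).drop m)) →
      pvFirst sL a j = pvFirst sL a k := by
  have step : ∀ m, ¬ ("AND".toList <+: (PySem.Chars.upper sL).drop m) →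
      pvFirst sL a m = pvFirst sL a (m + 1) := by
    intro m hm
    by_cases hlen : m < sL.length
    · have hP : pvP sL a m = false := by
        unfold pvP
        cases hsw : PySem.Chars.startswith ((PySem.Chars.upper sL).drop m) ("AND".toList) with
        | false => simp
        | true => exact absurd ((PySem.Chars.startswith_iff _ _).mp hsw) hm
      rw [pvFirst, if_pos hlen, hP]
      simp
    · rw [pvFirst, if_neg hlen, pvFirst, if_neg (by omega)]
  intro k
  induction k with
  | zero =>
    intro j hj _
    interval_cases j
    rfl
  | succ k ih =>
    intro j hjk hno
    rcases eq_or_lt_of_le hjk with rfl | hlt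
    · rfl
    · rw [ih j (by omega) (fun m h1 h2 => hno m h1 (by omega))]
      exact step k (hno k (by omega) (by omega))

lemma pvFirst_none (sL : List Char) (a : Nat) :
    ∀ (j : Nat), ¬ ("AND".toList <:+: (PySem.Chars.upper sL).drop j) → pvFirst sL a j = -1 := by
  suffices h : ∀ (n j : Nat), sL.length - j ≤ n →
      ¬ ("AND".toList <:+: (PySem.Chars.upper sL).drop j) → pvFirst sL a j = -1 by
    intro j hj
    exact h (sL.length - j) j (le_refl _) hj
  intro n
  induction n with
  | zero =>
    intro j hn _
    rw [pvFirst, if_neg (by omega)]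
  | succ n ih =>
    intro j hn hinf
    by_cases hlen : j < sL.length
    · have hP : pvP sL a j = false := by
        unfold pvP
        cases hsw : PySem.Chars.startswith ((PySem.Chars.upper sL).drop j) ("AND".toList) with
        | false => simp
        | true => exact absurd ((PySem.Chars.startswith_iff _ _).mp hsw).isInfix hinf
      rw [pvFirst, if_pos hlen, hP]
      simp only [Bool.false_eq_true, if_false]
      refine ih (j + 1) (by omega) ?_
      intro hcon
      refine hinf (hcon.trans ?_)
      have : (PySem.Chars.upper sL).drop (j + 1) = ((PySem.Chars.upper sL).drop j).drop 1 := by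
        rw [List.drop_drop]
      rw [this]
      exact (List.drop_suffix 1 _).isInfix
    · rw [pvFirst, if_neg hlen]

-- B's loop computes pvFirst as well.
lemma pvB_loop (sL : List Char) (a : Nat) :
    ∀ (fuel pos : Nat), pos ≤ sL.length → sL.length + 1 ≤ fuel + pos →
      find_top_level_and_alt_go sL (PySem.Chars.upper sL) (sL.length : Int) (a : Int) (pos : Int) fuel
        = pvFirst sL a pos := by
  have hlup : (PySem.Chars.upper sL).length = sL.length := by
    unfold PySem.Chars.upper; exact List.length_map ..
  intro fuel
  induction fuel with
  | zero =>
    intro pos hpos hf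
    omega
  | succ fuel ih =>
    intro pos hpos hf
    have hk : pos ≤ (PySem.Chars.upper sL).length := by omega
    by_cases hneg : PySem.Chars.findFrom (PySem.Chars.upper sL) ("AND".toList) (pos : Int) = -1
    · simp only [find_top_level_and_alt_go, hneg]
      rw [pvFirst_none sL a pos
        ((PySem.Chars.findFrom_natCast_eq_neg_one_iff (PySem.Chars.upper sL) ("AND".toList) pos hk).mp hneg)]
      simp
    · obtain ⟨hle, hpref, hmin⟩ :=
        PySem.Chars.findFrom_natCast_spec (PySem.Chars.upper sL) ("AND".toList) pos hk hneg
      set i := PySem.Chars.findFrom (PySem.Chars.upper sL) ("AND".toList) (pos : Int) with hi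
      have hi0 : 0 ≤ i := le_trans (by exact_mod_cast Nat.zero_le pos) hle
      have hicast : i = ((i.toNat : Nat) : Int) := by omega
      have hposle : pos ≤ i.toNat := by omega
      have hjlt : i.toNat < sL.length := by
        have h3 : ("AND".toList).length ≤ ((PySem.Chars.upper sL).drop i.toNat).length :=
          hpref.length_le
        simp [hlup] at h3
        omega
      -- skip the non-matching positions between pos and the candidate
      rw [pvFirst_skip sL a i.toNat pos hposle (fun m h1 h2 => hmin m h1 h2)]
      have hsw : PySem.Chars.startswith ((PySem.Chars.upper sL).drop i.toNat) ("AND".toList) = true :=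
        (PySem.Chars.startswith_iff _ _).mpr hpref
      have hslice : PySem.List.slice sL (some (a : Int)) (some i)
          = (sL.drop a).take (i.toNat - a) := by
        rw [PySem.List.slice_toNat sL (by exact_mod_cast Nat.zero_le a) hi0]
        simp
      simp only [find_top_level_and_alt_go]
      rw [← hi, hslice]
      rw [if_neg (by simp only [beq_iff_eq]; exact hneg)]
      rw [pvFirst, if_pos hjlt]
      have hPP : pvP sL a i.toNat = (pvTrail sL i.toNat && pvBal sL a i.toNat) := by
        unfold pvP
        rw [hsw, Bool.true_and]
      rw [hPP]
      have hcond : (((i + 3 == (sL.length : Int))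
             || !(PySem.Chars.isalnum ((PySem.List.pyGet? sL (i + 3)).getD ' ')
                  || (PySem.List.pyGet? sL (i + 3)).getD ' ' == '_'))
            && (((sL.drop a).take (i.toNat - a)).count '('
                 == ((sL.drop a).take (i.toNat - a)).count ')'))
          = (pvTrail sL i.toNat && pvBal sL a i.toNat) := by
        unfold pvTrail pvBal
        rw [← hicast]
      rw [hcond]
      by_cases hc : (pvTrail sL i.toNat && pvBal sL a i.toNat) = true
      · rw [if_pos hc, if_pos hc]
        exact hicast
      · rw [if_neg hc, if_neg hc]
        have := ih (i.toNat + 1) (by omega) (by omega)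
        rw [← this]
        congr 1
        omega

-- ===== VERDICT (by name: the statement is the Claim_ definition above) =====
theorem find_top_level_and_spec : Claim_equal_find_top_level_and := by
  intro s start_idx _ hpre
  unfold Pre_find_top_level_and at hpre
  unfold Spec_find_top_level_and
  obtain ⟨a, rfl⟩ : ∃ a : Nat, start_idx = (a : Int) :=
    ⟨start_idx.toNat, (Int.toNat_of_nonneg hpre).symm⟩
  simp only [find_top_level_and, find_top_level_and_alt]
  by_cases hcase : a ≤ s.toList.length
  · have hfuelA : (((s.toList.length : Int)) - (a : Int)).toNat = s.toList.length - a := by omega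
    rw [hfuelA]
    rw [pvA_loop s.toList a (s.toList.length - a) a 0 (le_refl a) (by omega) (by simp)]
    rw [pvB_loop s.toList a (s.toList.length + 2) a hcase (by omega)]
  · have hfuelA : (((s.toList.length : Int)) - (a : Int)).toNat = 0 := by omega
    rw [hfuelA]
    have hlup : (PySem.Chars.upper s.toList).length = s.toList.length := by
      unfold PySem.Chars.upper; exact List.length_map ..
    have hff : PySem.Chars.findFrom (PySem.Chars.upper s.toList) ("AND".toList) (a : Int) = -1 := by
      unfold PySem.Chars.findFrom
      rw [hlup]
      simp only []
      rw [if_neg (show ¬((a : Int) < 0) by omega)]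
      rw [if_pos (show ((s.toList.length : Int)) < (a : Int) by omega)]
    simp only [find_top_level_and_go, find_top_level_and_alt_go, hff]
    simp
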